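-- pv_equiv track=rewrite | github.com/xiaojkql/Algorithm-Data-Structure | LeetCode/Array/581.py | findUnsortedSubarray_secure
-- ===== SOURCE A (Python) =====
-- def findUnsortedSubarray_secure(nums):
--     """
--     :type nums: List[int]
--     :rtype: int
--     """
--     # 保证前面的都比后面小，用前面最大的与后面进行逐步比较，若大于则不符合
--     m = nums[0]
--     end = 0
--     for i in range(1, len(nums)):
--         if nums[i] >= m:
--             m = nums[i]
--         else:
--             end = i
--
--     # 保证前面的都比后面小，用后面的最小的与前面的逐步比较
--     m = nums[-1]
--     start = len(nums)-1
--     for i in range(len(nums)-1, -1, -1):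
--         if nums[i] <= m:
--             m = nums[i]
--         else:
--             start = i
--
--     if start == end:
--         return 0
--
--     return max(end-start+1, 0)
-- ===== SOURCE B (Python) =====
-- def findUnsortedSubarray_secure(nums):
--     """
--     :type nums: List[int]
--     :rtype: int
--     """
--     s = sorted(nums)
--     diffs = [i for i in range(len(nums)) if nums[i] != s[i]]
--     if not diffs:
--         return 0
--     return diffs[-1] - diffs[0] + 1
-- ===== Notes on version B (the rewrite author's own statement) =====
-- stated objective: simpler
-- what changed: Replaces A's two running-max/min scans tracking the last/first out-of-order index by comparing nums with its sorted copy and returning the span between the first and last mismatching positions.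
-- outside the precondition, e.g. on findUnsortedSubarray_secure([]): A raises IndexError, B returns 0
import Mathlib
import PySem

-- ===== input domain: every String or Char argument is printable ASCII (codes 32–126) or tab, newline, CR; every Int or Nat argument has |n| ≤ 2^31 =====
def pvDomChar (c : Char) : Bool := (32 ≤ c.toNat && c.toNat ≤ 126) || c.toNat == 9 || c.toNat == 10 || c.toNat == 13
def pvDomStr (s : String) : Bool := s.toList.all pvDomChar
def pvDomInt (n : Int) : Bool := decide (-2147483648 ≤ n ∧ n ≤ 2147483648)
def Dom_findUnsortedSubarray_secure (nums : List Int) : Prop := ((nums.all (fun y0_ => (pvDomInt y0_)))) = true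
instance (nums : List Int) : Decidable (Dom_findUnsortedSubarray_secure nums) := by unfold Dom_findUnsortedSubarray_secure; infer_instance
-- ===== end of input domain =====

-- B replaces A's two running-max/min scans by comparing nums with its sorted copy and
-- returning the span between the first and last mismatching positions (simpler, not faster).


-- ===== PORT A =====
def findUnsortedSubarray_secure (nums : List Int) : Int :=
  let fw := (PySem.List.pyRange 1 (nums.length : Int) 1).foldl (fun (st : Int × Int) i =>
      if PySem.List.pyGetD nums i 0 ≥ st.1 then (PySem.List.pyGetD nums i 0, st.2)
      else (st.1, i)) (PySem.List.pyGetD nums 0 0, 0)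
  let bw := (PySem.List.pyRange ((nums.length : Int) - 1) (-1) (-1)).foldl (fun (st : Int × Int) i =>
      if PySem.List.pyGetD nums i 0 ≤ st.1 then (PySem.List.pyGetD nums i 0, st.2)
      else (st.1, i)) (PySem.List.pyGetD nums (-1) 0, (nums.length : Int) - 1)
  if bw.2 = fw.2 then 0 else max (fw.2 - bw.2 + 1) 0

-- ===== PORT B =====
def findUnsortedSubarray_secure_alt (nums : List Int) : Int :=
  let s := PySem.List.sorted nums (fun x => x) false
  let diffs := (PySem.List.pyRange 0 (nums.length : Int) 1).filter
      (fun i => PySem.List.pyGetD nums i 0 ≠ PySem.List.pyGetD s i 0)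
  if diffs = [] then 0
  else PySem.List.pyGetD diffs (-1) 0 - PySem.List.pyGetD diffs 0 0 + 1

-- ===== PRECONDITION & SPEC =====
-- A reads the first and the last element up front: it raises IndexError exactly on the empty list.
def Pre_findUnsortedSubarray_secure (nums : List Int) : Prop := nums ≠ []
instance (nums : List Int) : Decidable (Pre_findUnsortedSubarray_secure nums) := by unfold Pre_findUnsortedSubarray_secure; infer_instance
def pvWitness_findUnsortedSubarray_secure : List Int := [2, 6, 4, 8, 10, 9, 15]

def Spec_findUnsortedSubarray_secure (nums : List Int) (out : Int) : Prop := out = findUnsortedSubarray_secure_alt nums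
instance (nums : List Int) (out : Int) : Decidable (Spec_findUnsortedSubarray_secure nums out) := by unfold Spec_findUnsortedSubarray_secure; infer_instance

-- ===== CLAIM (what is proved, stated in full; the proofs are below) =====
def Claim_equal_findUnsortedSubarray_secure : Prop := ∀ (nums : List Int), Dom_findUnsortedSubarray_secure nums → Pre_findUnsortedSubarray_secure nums → Spec_findUnsortedSubarray_secure nums (findUnsortedSubarray_secure nums)

-- ===== LEMMAS AND PROOFS =====

def srtI (l : List Int) : List Int := PySem.List.sorted l (fun x => x) false
abbrev Ag (l : List Int) (j : Nat) : Prop := l.getD j 0 = (srtI l).getD j 0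
def BadF (l : List Int) (j : Nat) : Prop := ∃ i, i < j ∧ l.getD j 0 < l.getD i 0
def BadB (l : List Int) (j : Nat) : Prop := ∃ i, j < i ∧ i < l.length ∧ l.getD i 0 < l.getD j 0

lemma len_srtI (l : List Int) : (srtI l).length = l.length := PySem.List.length_sorted l _ false

lemma take_perm (l : List Int) (k : Nat)
    (h : ∀ j, k ≤ j → j < l.length → Ag l j) : (l.take k).Perm ((srtI l).take k) := by
  have hlen := len_srtI l
  have hdrop : l.drop k = (srtI l).drop k := by
    apply List.ext_getElem (by simp [hlen])
    intro i h1 h2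
    simp only [List.getElem_drop]
    have h3 := h (k + i) (by omega) (by simp at h1; omega)
    unfold Ag at h3
    rwa [List.getD_eq_getElem, List.getD_eq_getElem] at h3
  have hp : (l.take k ++ l.drop k).Perm ((srtI l).take k ++ (srtI l).drop k) := by
    rw [List.take_append_drop, List.take_append_drop]
    exact (PySem.List.sorted_perm l (fun x => x) false).symm
  rw [hdrop] at hp
  exact (List.perm_append_right_iff _).mp hp

lemma drop_perm (l : List Int) (k : Nat)
    (h : ∀ j, j < k → Ag l j) : (l.drop k).Perm ((srtI l).drop k) := by
  have hlen := len_srtI l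
  by_cases hk : k ≤ l.length
  · have htake : l.take k = (srtI l).take k := by
      apply List.ext_getElem (by simp [hlen])
      intro i h1 h2
      simp only [List.getElem_take]
      have h3 := h i (by simp at h1; omega)
      unfold Ag at h3
      rwa [List.getD_eq_getElem, List.getD_eq_getElem] at h3
    have hp : (l.take k ++ l.drop k).Perm ((srtI l).take k ++ (srtI l).drop k) := by
      rw [List.take_append_drop, List.take_append_drop]
      exact (PySem.List.sorted_perm l (fun x => x) false).symm
    rw [htake] at hp
    exact (List.perm_append_left_iff _).mp hp
  · rw [List.drop_eq_nil_of_le (by omega), List.drop_eq_nil_of_le (by omega)]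

lemma mem_take_of_lt (l : List Int) {i k : Nat} (hik : i < k) (hi : i < l.length) :
    l.getD i 0 ∈ l.take k := by
  rw [List.getD_eq_getElem l 0 hi]
  have h1 : i < (l.take k).length := by simp; omega
  have := List.getElem_take (xs := l) (j := k) (i := i) (h := h1)
  rw [← this]
  exact List.getElem_mem _

lemma mem_take_iff (l : List Int) {x : Int} {k : Nat} (h : x ∈ l.take k) :
    ∃ p, p < k ∧ p < l.length ∧ l.getD p 0 = x := by
  obtain ⟨i, hi, hx⟩ := List.mem_iff_getElem.mp h
  have hlen : i < l.length := by simp at hi; omega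
  refine ⟨i, by simp at hi; omega, hlen, ?_⟩
  rw [List.getD_eq_getElem l 0 hlen, ← hx, List.getElem_take]

lemma mem_drop_of_ge (l : List Int) {i k : Nat} (hik : k ≤ i) (hi : i < l.length) :
    l.getD i 0 ∈ l.drop k := by
  rw [List.getD_eq_getElem l 0 hi]
  have h1 : i - k < (l.drop k).length := by simp; omega
  have h3 : l[i] = (l.drop k)[i - k]'h1 := by
    rw [List.getElem_drop]
    congr 1
    omega
  rw [h3]
  exact List.getElem_mem _

lemma mem_drop_iff (l : List Int) {x : Int} {k : Nat} (h : x ∈ l.drop k) :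
    ∃ p, k ≤ p ∧ p < l.length ∧ l.getD p 0 = x := by
  obtain ⟨i, hi, hx⟩ := List.mem_iff_getElem.mp h
  have hlen : k + i < l.length := by simp at hi; omega
  refine ⟨k + i, by omega, hlen, ?_⟩
  rw [List.getD_eq_getElem l 0 hlen, ← hx, List.getElem_drop]

-- sorted index comparison on getD
lemma srtI_mono (l : List Int) {p q : Nat} (hpq : p ≤ q) (hq : q < l.length) :
    (srtI l).getD p 0 ≤ (srtI l).getD q 0 := by
  have hlen := len_srtI l
  unfold srtI
  rw [List.getD_eq_getElem _ 0 (by rw [PySem.List.length_sorted]; omega),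
      List.getD_eq_getElem _ 0 (by rw [PySem.List.length_sorted]; omega)]
  exact PySem.List.sorted_id_getElem_mono l hpq (by rw [PySem.List.length_sorted]; omega)

-- if everything from k on agrees with the sorted copy, index k is not a forward drop
lemma notBadF_of_agree (l : List Int) (k : Nat) (hk : k < l.length)
    (h : ∀ j, k ≤ j → j < l.length → Ag l j) : ¬ BadF l k := by
  rintro ⟨i, hik, hlt⟩
  have hperm := take_perm l k h
  have hmem : l.getD i 0 ∈ (srtI l).take k :=
    hperm.mem_iff.mp (mem_take_of_lt l hik (by omega))
  obtain ⟨p, hpk, hpl, hpx⟩ := mem_take_iff (srtI l) hmem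
  have h1 : (srtI l).getD p 0 ≤ (srtI l).getD k 0 := srtI_mono l (by omega) hk
  have h2 := (h k le_rfl hk)
  unfold Ag at h2
  omega

-- the last disagreeing index is a forward drop
lemma badF_of_last (l : List Int) (k : Nat) (hk : k < l.length)
    (hne : ¬ Ag l k) (h : ∀ j, k < j → j < l.length → Ag l j) : BadF l k := by
  by_contra hnb
  unfold BadF at hnb
  push_neg at hnb
  have hperm := take_perm l (k + 1) (fun j h1 h2 => h j (by omega) h2)
  -- l[k] is ≥ everything in l.take (k+1), s[k] ≥ everything in s.take (k+1)
  have hls : l.getD k 0 ∈ (srtI l).take (k + 1) :=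
    hperm.mem_iff.mp (mem_take_of_lt l (Nat.lt_succ_self k) hk)
  obtain ⟨p, hpk, hpl, hpx⟩ := mem_take_iff (srtI l) hls
  have h1 : l.getD k 0 ≤ (srtI l).getD k 0 := by
    have := srtI_mono l (p := p) (q := k) (by omega) hk
    omega
  have hsl : (srtI l).getD k 0 ∈ l.take (k + 1) := by
    refine hperm.symm.mem_iff.mp (mem_take_of_lt (srtI l) (Nat.lt_succ_self k) ?_)
    rw [len_srtI]; omega
  obtain ⟨q, hqk, hql, hqx⟩ := mem_take_iff l hsl
  have h2 : (srtI l).getD k 0 ≤ l.getD k 0 := by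
    rcases Nat.lt_or_ge q k with hq | hq
    · have := hnb q hq; omega
    · have heq : q = k := by omega
      subst heq
      omega
  exact hne (by unfold Ag; omega)

-- if everything up to k agrees with the sorted copy, index k is not a backward rise
lemma notBadB_of_agree (l : List Int) (k : Nat) (hk : k < l.length)
    (h : ∀ j, j ≤ k → Ag l j) : ¬ BadB l k := by
  rintro ⟨i, hki, hil, hlt⟩
  have hperm := drop_perm l (k + 1) (fun j hj => h j (by omega))
  have hmem : l.getD i 0 ∈ (srtI l).drop (k + 1) :=
    hperm.mem_iff.mp (mem_drop_of_ge l (by omega) hil)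
  obtain ⟨p, hpk, hpl, hpx⟩ := mem_drop_iff (srtI l) hmem
  have hpl' : p < l.length := by rw [len_srtI] at hpl; omega
  have h1 : (srtI l).getD k 0 ≤ (srtI l).getD p 0 := srtI_mono l (by omega) hpl'
  have h2 := h k le_rfl
  unfold Ag at h2
  omega

-- the first disagreeing index is a backward rise
lemma badB_of_first (l : List Int) (k : Nat) (hk : k < l.length)
    (hne : ¬ Ag l k) (h : ∀ j, j < k → Ag l j) : BadB l k := by
  by_contra hnb
  unfold BadB at hnb
  push_neg at hnb
  have hperm := drop_perm l k h
  have hls : l.getD k 0 ∈ (srtI l).drop k :=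
    hperm.mem_iff.mp (mem_drop_of_ge l le_rfl hk)
  obtain ⟨p, hpk, hpl, hpx⟩ := mem_drop_iff (srtI l) hls
  have hpl' : p < l.length := by rw [len_srtI] at hpl; omega
  have h1 : (srtI l).getD k 0 ≤ l.getD k 0 := by
    have := srtI_mono l (p := k) (q := p) hpk hpl'
    omega
  have hsl : (srtI l).getD k 0 ∈ l.drop k := by
    refine hperm.symm.mem_iff.mp (mem_drop_of_ge (srtI l) le_rfl ?_)
    rw [len_srtI]; omega
  obtain ⟨q, hqk, hql, hqx⟩ := mem_drop_iff l hsl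
  have h2 : l.getD k 0 ≤ (srtI l).getD k 0 := by
    rcases Nat.lt_or_ge k q with hq | hq
    · have := hnb q hq hql; omega
    · have heq : q = k := by omega
      subst heq
      omega
  exact hne (by unfold Ag; omega)

-- a permutation cannot disagree with the sorted copy at exactly one place
lemma no_single_mismatch (l : List Int) (k : Nat) (hk : k < l.length)
    (h : ∀ j, j ≠ k → j < l.length → Ag l j) : Ag l k := by
  have hperm := drop_perm l k (fun j hj => h j (by omega) (by omega))
  have hkd : l.drop k = l.getD k 0 :: l.drop (k + 1) := by
    rw [List.drop_eq_getElem_cons hk, List.getD_eq_getElem l 0 hk]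
  have hks : (srtI l).drop k = (srtI l).getD k 0 :: (srtI l).drop (k + 1) := by
    rw [List.drop_eq_getElem_cons (by rw [len_srtI]; omega), List.getD_eq_getElem _ 0 (by rw [len_srtI]; omega)]
  have hdeq : l.drop (k + 1) = (srtI l).drop (k + 1) := by
    apply List.ext_getElem (by simp [len_srtI])
    intro i h1 h2
    simp only [List.getElem_drop]
    have h3 := h (k + 1 + i) (by omega) (by simp at h1; omega)
    unfold Ag at h3
    rwa [List.getD_eq_getElem, List.getD_eq_getElem] at h3
  rw [hkd, hks, hdeq] at hperm
  have : ([l.getD k 0] ++ (srtI l).drop (k + 1)).Perm ([(srtI l).getD k 0] ++ (srtI l).drop (k + 1)) := by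
    simpa using hperm
  have h6 := (List.perm_append_right_iff _).mp this
  unfold Ag
  exact List.singleton_perm_singleton.mp h6

def fwdState (l : List Int) (k : Nat) : Int × Int :=
  (PySem.List.pyRange 1 (k : Int) 1).foldl (fun (st : Int × Int) i =>
      if PySem.List.pyGetD l i 0 ≥ st.1 then (PySem.List.pyGetD l i 0, st.2)
      else (st.1, i)) (PySem.List.pyGetD l 0 0, 0)

lemma fwdState_succ (l : List Int) (k : Nat) (h1 : 1 ≤ k) :
    fwdState l (k + 1) =
      if l.getD k 0 ≥ (fwdState l k).1 then (l.getD k 0, (fwdState l k).2)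
      else ((fwdState l k).1, (k : Int)) := by
  unfold fwdState
  have hcast : ((k + 1 : Nat) : Int) = (k : Int) + 1 := by push_cast; ring
  rw [hcast, PySem.List.pyRange_one_succ_right (by exact_mod_cast h1), List.foldl_append]
  simp [PySem.List.pyGetD_natCast]

lemma fwd_inv (l : List Int) (k : Nat) (h1 : 1 ≤ k) (hk : k ≤ l.length) :
    (∀ i, i < k → l.getD i 0 ≤ (fwdState l k).1) ∧
    (∃ i, i < k ∧ l.getD i 0 = (fwdState l k).1) ∧
    (∃ e : Nat, (fwdState l k).2 = (e : Int) ∧ e < k ∧ (e = 0 ∨ BadF l e) ∧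
      ∀ j, e < j → j < k → ¬ BadF l j) := by
  induction k with
  | zero => omega
  | succ k ih =>
    rcases Nat.eq_or_lt_of_le h1 with hbase | hstep
    · -- k + 1 = 1
      have hk0 : k = 0 := by omega
      subst hk0
      have hfs : fwdState l 1 = (l.getD 0 0, 0) := by
        unfold fwdState
        rw [show ((1 : Nat) : Int) = 1 by norm_num, PySem.List.pyRange_one_eq_nil le_rfl]
        simp [PySem.List.pyGetD_zero]
      rw [hfs]
      refine ⟨?_, ⟨0, by omega, rfl⟩, ⟨0, rfl, by omega, Or.inl rfl, by omega⟩⟩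
      intro i hi
      have : i = 0 := by omega
      subst this; exact le_rfl
    · have hk1 : 1 ≤ k := by omega
      obtain ⟨hmax, ⟨iw, hiw, hiweq⟩, ⟨e, he, hek, heb, heno⟩⟩ := ih hk1 (by omega)
      have hstep' := fwdState_succ l k hk1
      by_cases hc : l.getD k 0 ≥ (fwdState l k).1
      · rw [if_pos hc] at hstep'
        rw [hstep']
        refine ⟨?_, ⟨k, by omega, rfl⟩, ⟨e, he, by omega, heb, ?_⟩⟩
        · intro i hi
          rcases Nat.lt_or_ge i k with h | h
          · exact le_trans (hmax i h) hc
          · have : i = k := by omega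
            subst this; exact le_rfl
        · intro j hj hjk
          rcases Nat.lt_or_ge j k with h | h
          · exact heno j hj h
          · have : j = k := by omega
            subst this
            rintro ⟨i, hik, hlt⟩
            have := hmax i hik
            omega
      · rw [if_neg hc] at hstep'
        rw [hstep']
        push_neg at hc
        refine ⟨?_, ⟨iw, by omega, hiweq⟩, ⟨k, rfl, by omega, Or.inr ⟨iw, hiw, by omega⟩, by omega⟩⟩
        intro i hi
        rcases Nat.lt_or_ge i k with h | h
        · exact hmax i h
        · have : i = k := by omega
          subst this; omega

def bwdState (l : List Int) (k : Nat) : Int × Int :=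
  (PySem.List.pyRange ((l.length : Int) - 1) ((k : Int) - 1) (-1)).foldl (fun (st : Int × Int) i =>
      if PySem.List.pyGetD l i 0 ≤ st.1 then (PySem.List.pyGetD l i 0, st.2)
      else (st.1, i)) (PySem.List.pyGetD l (-1) 0, (l.length : Int) - 1)

lemma pyRange_neg_one_split (a b : Int) (hb : b ≤ a) :
    PySem.List.pyRange a (b - 1) (-1) = PySem.List.pyRange a b (-1) ++ [b] := by
  rw [PySem.List.pyRange_neg_one_eq_reverse, PySem.List.pyRange_neg_one_eq_reverse,
      show b - 1 + 1 = b by ring, PySem.List.pyRange_one_cons (by omega)]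
  simp

lemma bwdState_pred (l : List Int) (k : Nat) (hk : k < l.length) :
    bwdState l k =
      if l.getD k 0 ≤ (bwdState l (k + 1)).1 then (l.getD k 0, (bwdState l (k + 1)).2)
      else ((bwdState l (k + 1)).1, (k : Int)) := by
  unfold bwdState
  have hcast : ((k : Nat) : Int) - 1 = (((k + 1 : Nat) : Int) - 1) - 1 := by push_cast; ring
  rw [hcast, pyRange_neg_one_split _ _ (by push_cast; omega), List.foldl_append]
  have h2 : (((k + 1 : Nat) : Int) - 1) = (k : Int) := by push_cast; ring
  rw [h2]
  simp [PySem.List.pyGetD_natCast]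

lemma bwd_inv (l : List Int) (hl : l ≠ []) (m : Nat) (hm : m ≤ l.length) :
    (∀ i, l.length - m ≤ i → i < l.length → (bwdState l (l.length - m)).1 ≤ l.getD i 0) ∧
    (∃ i, min (l.length - m) (l.length - 1) ≤ i ∧ i < l.length ∧
      l.getD i 0 = (bwdState l (l.length - m)).1) ∧
    (∃ s : Nat, (bwdState l (l.length - m)).2 = (s : Int) ∧
      min (l.length - m) (l.length - 1) ≤ s ∧ s ≤ l.length - 1 ∧
      (s = l.length - 1 ∨ BadB l s) ∧
      ∀ j, l.length - m ≤ j → j < s → ¬ BadB l j) := by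
  have hn : 1 ≤ l.length := List.length_pos_iff.mpr hl
  have hinit : PySem.List.pyGetD l (-1) 0 = l.getD (l.length - 1) 0 := by
    rw [PySem.List.pyGetD_neg_one l 0 hl, List.getLast_eq_getElem, List.getD_eq_getElem l 0 (by omega)]
  induction m with
  | zero =>
    have hbase : bwdState l (l.length - 0) = (PySem.List.pyGetD l (-1) 0, (l.length : Int) - 1) := by
      unfold bwdState
      rw [PySem.List.pyRange_neg_one_eq_nil (by push_cast; omega)]
      rfl
    rw [hbase, hinit]
    refine ⟨by omega, ⟨l.length - 1, by omega, by omega, rfl⟩,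
      ⟨l.length - 1, by push_cast; omega, by omega, by omega, Or.inl rfl, by omega⟩⟩
  | succ m ih =>
    obtain ⟨hmin, ⟨iw, hiw, hiwl, hiweq⟩, ⟨s, hs, hsmin, hsmax, hsb, hsno⟩⟩ := ih (by omega)
    set k := l.length - (m + 1) with hkdef
    have hkk : k + 1 = l.length - m := by omega
    have hkl : k < l.length := by omega
    have hstep := bwdState_pred l k hkl
    rw [hkk] at hstep
    by_cases hc : l.getD k 0 ≤ (bwdState l (l.length - m)).1
    · rw [if_pos hc] at hstep
      rw [hstep]
      refine ⟨?_, ⟨k, by omega, by omega, rfl⟩, ⟨s, hs, by omega, hsmax, hsb, ?_⟩⟩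
      · intro i hik hil
        rcases Nat.lt_or_ge i (l.length - m) with h | h
        · have : i = k := by omega
          subst this; exact le_rfl
        · exact le_trans hc (hmin i h hil)
      · intro j hjk hjs
        rcases Nat.lt_or_ge j (l.length - m) with h | h
        · have : j = k := by omega
          subst this
          rintro ⟨i, hki, hil, hlt⟩
          have := hmin i (by omega) hil
          omega
        · exact hsno j h hjs
    · rw [if_neg hc] at hstep
      rw [hstep]
      push_neg at hc
      have hik : k < iw := by
        rcases Nat.lt_or_ge k (l.length - 1) with h | h
        · omega
        · -- k = l.length - 1, so l.length - m = l.length, iw = l.length - 1 = k: contradiction with hc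
          exfalso
          have : iw = k := by omega
          subst this
          omega
      refine ⟨?_, ⟨iw, by omega, hiwl, hiweq⟩,
        ⟨k, rfl, by omega, by omega, Or.inr ⟨iw, hik, hiwl, by omega⟩, by omega⟩⟩
      intro i hik' hil
      rcases Nat.lt_or_ge i (l.length - m) with h | h
      · have : i = k := by omega
        subst this; omega
      · exact hmin i h hil

lemma diffs_eq (l : List Int) :
    (PySem.List.pyRange 0 (l.length : Int) 1).filter
      (fun i => PySem.List.pyGetD l i 0 ≠ PySem.List.pyGetD (PySem.List.sorted l (fun x => x) false) i 0)
    = List.map (fun k : Nat => (k : Int))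
        ((List.range l.length).filter (fun j => decide (l.getD j 0 ≠ (srtI l).getD j 0))) := by
  rw [PySem.List.pyRange_zero_natCast, List.filter_map]
  exact congrArg (List.map _) (List.filter_congr (fun j hj => by
    simp [Function.comp, PySem.List.pyGetD_natCast, srtI]))

lemma pairwise_filter_range (n : Nat) (p : Nat → Bool) :
    ((List.range n).filter p).Pairwise (· < ·) :=
  List.Pairwise.sublist List.filter_sublist List.pairwise_lt_range

lemma le_getLast_of_pairwise {D : List Nat} (hp : D.Pairwise (· < ·)) {x : Nat} (hx : x ∈ D)
    (hne : D ≠ []) : x ≤ D.getLast hne := by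
  obtain ⟨i, hi, hix⟩ := List.mem_iff_getElem.mp hx
  rw [List.getLast_eq_getElem]
  rcases Nat.lt_or_ge i (D.length - 1) with h | h
  · have := List.pairwise_iff_getElem.mp hp i (D.length - 1) hi (by omega) h
    omega
  · have : i = D.length - 1 := by omega
    subst this
    omega

lemma main_eq (l : List Int) (hl : l ≠ []) :
    findUnsortedSubarray_secure l = findUnsortedSubarray_secure_alt l := by
  have hn : 1 ≤ l.length := List.length_pos_iff.mpr hl
  have hlen := len_srtI l
  have hA : findUnsortedSubarray_secure l =
      (if (bwdState l 0).2 = (fwdState l l.length).2 then 0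
       else max ((fwdState l l.length).2 - (bwdState l 0).2 + 1) 0) := rfl
  set D : List Nat :=
    (List.range l.length).filter (fun j => decide (l.getD j 0 ≠ (srtI l).getD j 0)) with hDdef
  have hB : findUnsortedSubarray_secure_alt l =
      (if List.map (fun k : Nat => (k : Int)) D = [] then 0
       else PySem.List.pyGetD (List.map (fun k : Nat => (k : Int)) D) (-1) 0 -
            PySem.List.pyGetD (List.map (fun k : Nat => (k : Int)) D) 0 0 + 1) := by
    have h0 : findUnsortedSubarray_secure_alt l =
        (if (PySem.List.pyRange 0 (l.length : Int) 1).filter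
              (fun i => PySem.List.pyGetD l i 0 ≠
                PySem.List.pyGetD (PySem.List.sorted l (fun x => x) false) i 0) = [] then 0
         else PySem.List.pyGetD ((PySem.List.pyRange 0 (l.length : Int) 1).filter
              (fun i => PySem.List.pyGetD l i 0 ≠
                PySem.List.pyGetD (PySem.List.sorted l (fun x => x) false) i 0)) (-1) 0 -
              PySem.List.pyGetD ((PySem.List.pyRange 0 (l.length : Int) 1).filter
              (fun i => PySem.List.pyGetD l i 0 ≠
                PySem.List.pyGetD (PySem.List.sorted l (fun x => x) false) i 0)) 0 0 + 1) := rfl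
    rw [h0, diffs_eq l]
  have hmemD : ∀ j, j ∈ D ↔ j < l.length ∧ ¬ Ag l j := by
    intro j
    simp [hDdef, List.mem_filter, List.mem_range, Ag]
  -- A-side invariants
  obtain ⟨_, _, ⟨e, he, hek, heb, heno⟩⟩ := fwd_inv l l.length hn le_rfl
  have hbwd := bwd_inv l hl l.length le_rfl
  rw [Nat.sub_self] at hbwd
  obtain ⟨_, _, ⟨s, hs, hsmin, hsmax, hsb, hsno⟩⟩ := hbwd
  by_cases hall : ∀ j, j < l.length → Ag l j
  · -- already sorted: both sides are 0
    have hD : D = [] := by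
      rw [hDdef]
      apply List.filter_eq_nil_iff.mpr
      intro j hj
      simp only [List.mem_range] at hj
      have hAgj := hall j hj
      unfold Ag at hAgj
      simp only [decide_eq_true_eq, not_not]
      simpa [List.getD_eq_getElem?_getD] using hAgj
    have he0 : e = 0 := by
      rcases heb with h | h
      · exact h
      · exact absurd h (notBadF_of_agree l e (by omega) (fun j h1 h2 => hall j h2))
    have hs1 : s = l.length - 1 := by
      rcases hsb with h | h
      · exact h
      · exact absurd h (notBadB_of_agree l s (by omega) (fun j hj => hall j (by omega)))
    rw [hA, hB, hD, he, hs, he0, hs1]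
    simp only [List.map_nil, if_pos]
    rcases Nat.eq_or_lt_of_le hn with h1 | h1
    · rw [if_pos (by push_cast; omega)]
    · rw [if_neg (by push_cast; omega), max_eq_right (by push_cast; omega)]
  · -- not sorted
    push_neg at hall
    obtain ⟨j0, hj0l, hj0⟩ := hall
    have hex : ∃ j, j < l.length ∧ ¬ Ag l j := ⟨j0, hj0l, hj0⟩
    set F : Nat := Nat.find hex with hFdef
    set L : Nat := Nat.findGreatest (fun j => ¬ Ag l j) (l.length - 1) with hLdef
    obtain ⟨hFl, hFna⟩ := Nat.find_spec hex
    have hFmin : ∀ j, j < F → Ag l j := by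
      intro j hj
      have := Nat.find_min hex hj
      by_contra hna
      exact this ⟨by omega, hna⟩
    have hLna : ¬ Ag l L := by
      have h := Nat.findGreatest_spec (P := fun j => ¬ Ag l j) (n := l.length - 1) (m := j0)
        (by omega) hj0
      rw [← hLdef] at h
      exact h
    have hLle : L ≤ l.length - 1 := by
      have h : Nat.findGreatest (fun j => ¬ Ag l j) (l.length - 1) ≤ l.length - 1 :=
        Nat.findGreatest_le _
      rw [← hLdef] at h
      exact h
    have hLmax : ∀ j, L < j → j < l.length → Ag l j := by
      intro j h1 h2
      by_contra hna
      exact Nat.findGreatest_is_greatest h1 (by omega) hna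
    have hFL : F ≤ L := Nat.le_findGreatest (by omega) hFna
    have hFneL : F ≠ L := by
      intro hfl
      apply hFna
      apply no_single_mismatch l F hFl
      intro j hj hjl
      rcases Nat.lt_or_ge j F with h | h
      · exact hFmin j h
      · exact hLmax j (by omega) hjl
    -- e = L
    have heL : e = L := by
      have hBadL : BadF l L := badF_of_last l L (by omega) hLna hLmax
      have h1 : L ≤ e := by
        by_contra h
        exact heno L (by omega) (by omega) hBadL
      rcases heb with h | h
      · omega
      · by_contra hne
        have : ∀ j, e ≤ j → j < l.length → Ag l j := fun j h1 h2 => hLmax j (by omega) h2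
        exact notBadF_of_agree l e (by omega) this h
    -- s = F
    have hsF : s = F := by
      have hBadF : BadB l F := badB_of_first l F hFl hFna hFmin
      have h1 : s ≤ F := by
        by_contra h
        exact hsno F (by omega) (by omega) hBadF
      rcases hsb with h | h
      · omega
      · by_contra hne
        have : ∀ j, j ≤ s → Ag l j := fun j hj => hFmin j (by omega)
        exact notBadB_of_agree l s (by omega) this h
    -- B's diffs list
    have hFD : F ∈ D := (hmemD F).mpr ⟨hFl, hFna⟩
    have hLD : L ∈ D := (hmemD L).mpr ⟨by omega, hLna⟩
    have hDne : D ≠ [] := fun h => by rw [h] at hFD; exact absurd hFD (List.not_mem_nil)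
    have hpw : D.Pairwise (· < ·) := pairwise_filter_range _ _
    obtain ⟨d, t, hDcons⟩ := List.exists_cons_of_ne_nil hDne
    have hdF : d = F := by
      have hdD : d ∈ D := by rw [hDcons]; exact List.mem_cons_self
      have h1 : F ≤ d := Nat.find_min' hex ((hmemD d).mp hdD)
      have hFdt : F ∈ d :: t := hDcons ▸ hFD
      rcases List.mem_cons.mp hFdt with h | h
      · omega
      · have := List.rel_of_pairwise_cons (hDcons ▸ hpw) h
        omega
    have hlast : D.getLast hDne = L := by
      have h1 : L ≤ D.getLast hDne := le_getLast_of_pairwise hpw hLD hDne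
      have h2 : D.getLast hDne ∈ D := List.getLast_mem hDne
      obtain ⟨h3, h4⟩ := (hmemD _).mp h2
      have h5 : D.getLast hDne ≤ L := Nat.le_findGreatest (by omega) h4
      omega
    have hmapne : List.map (fun k : Nat => (k : Int)) D ≠ [] := by
      simp [hDne]
    rw [hA, hB, he, hs, heL, hsF, if_neg hmapne,
        PySem.List.pyGetD_neg_one _ 0 hmapne, PySem.List.pyGetD_zero]
    have hgl : (List.map (fun k : Nat => (k : Int)) D).getLast hmapne = (L : Int) := by
      rw [List.getLast_eq_getElem, List.getElem_map]
      congr 1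
      rw [← hlast, List.getLast_eq_getElem]
      congr 1
      simp
    have hg0 : (List.map (fun k : Nat => (k : Int)) D).getD 0 0 = (F : Int) := by
      rw [hDcons, hdF]
      simp
    rw [hgl, hg0, if_neg (by intro hc; exact hFneL (by exact_mod_cast hc)),
        max_eq_left (by push_cast; omega)]

-- ===== VERDICT (by name: the statement is the Claim_ definition above) =====
theorem findUnsortedSubarray_secure_spec : Claim_equal_findUnsortedSubarray_secure := by
  intro nums _ hpre
  unfold Spec_findUnsortedSubarray_secure
  exact main_eq nums hpre
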